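-- pv_equiv track=rewrite | github.com/Bronzin/ghigus-backend | app/services/attivo.py | _map_riclass_to_category
-- ===== SOURCE A (Python) =====
-- from typing import List, Dict
--
-- _RICLASS_TO_CATEGORY: Dict[str, str] = {
--     # Codici flat (dal maps_sp_ready.csv)
--     "LIQUIDITA_E_ESIGIBILITA_IMMEDIATE": "DISPONIBILITA_LIQUIDE",
--     "CREDITI": "CREDITI_COMMERCIALI",
--     "RIMANENZE": "RIMANENZE",
--     "RATEI_E_RISCONTI": "RATEI_RISCONTI_ATTIVI",
--     "IMMOBILIZZAZIONI_IMMATERIALI": "IMMOBILIZZAZIONI_IMMATERIALI",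
--     "IMMOBILIZZAZIONI_MATERIALI": "IMMOBILIZZAZIONI_MATERIALI",
--     "IMMOBILIZZAZIONI_FINANZIARIE": "IMMOBILIZZAZIONI_FINANZIARIE",
--     "IMMOBILIZZAZIONI_LEASING": "IMMOBILIZZAZIONI_MATERIALI",
--     "F_DO_AMM_TO_IMM_NI_IMMATERIALI": "IMMOBILIZZAZIONI_IMMATERIALI",
--     "F_DO_AMM_TO_IMM_NI_MATERIALI": "IMMOBILIZZAZIONI_MATERIALI",
--     # Codici gerarchici (legacy)
--     "A1.1": "DISPONIBILITA_LIQUIDE",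
--     "A1.2": "CREDITI_COMMERCIALI",
--     "A1.3": "RIMANENZE",
--     "A1.4": "ATTIVITA_FINANZIARIE",
--     "A1.5": "CREDITI_TRIBUTARI",
--     "A1.6": "CREDITI_VS_ALTRI",
--     "A1.7": "RATEI_RISCONTI_ATTIVI",
--     "A2.1": "IMMOBILIZZAZIONI_IMMATERIALI",
--     "A2.2": "IMMOBILIZZAZIONI_MATERIALI",
--     "A2.3": "IMMOBILIZZAZIONI_FINANZIARIE",
--     "A2.4": "PARTECIPAZIONI",
--     "A2.5": "AVVIAMENTO",
-- }
--
-- def _normalize_code(riclass_code: str) -> str: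
--     """Rimuove il prefisso SP_ se presente."""
--     if riclass_code.startswith("SP_"):
--         return riclass_code[3:]
--     return riclass_code
--
-- def _map_riclass_to_category(riclass_code: str) -> str:
--     """Mappa un riclass_code alla categoria attivo più specifica."""
--     code = _normalize_code(riclass_code)
--     # Lookup diretto
--     if code in _RICLASS_TO_CATEGORY:
--         return _RICLASS_TO_CATEGORY[code]
--     # Prefix match (per codici gerarchici)
--     for prefix, cat in sorted(_RICLASS_TO_CATEGORY.items(), key=lambda x: -len(x[0])):
--         if code.startswith(prefix):
--             return cat
--     return "ALTRO_ATTIVO"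
-- ===== SOURCE B (Python) =====
-- from typing import List, Dict
--
-- _RICLASS_TO_CATEGORY: Dict[str, str] = {
--     # Codici flat (dal maps_sp_ready.csv)
--     "LIQUIDITA_E_ESIGIBILITA_IMMEDIATE": "DISPONIBILITA_LIQUIDE",
--     "CREDITI": "CREDITI_COMMERCIALI",
--     "RIMANENZE": "RIMANENZE",
--     "RATEI_E_RISCONTI": "RATEI_RISCONTI_ATTIVI",
--     "IMMOBILIZZAZIONI_IMMATERIALI": "IMMOBILIZZAZIONI_IMMATERIALI",
--     "IMMOBILIZZAZIONI_MATERIALI": "IMMOBILIZZAZIONI_MATERIALI",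
--     "IMMOBILIZZAZIONI_FINANZIARIE": "IMMOBILIZZAZIONI_FINANZIARIE",
--     "IMMOBILIZZAZIONI_LEASING": "IMMOBILIZZAZIONI_MATERIALI",
--     "F_DO_AMM_TO_IMM_NI_IMMATERIALI": "IMMOBILIZZAZIONI_IMMATERIALI",
--     "F_DO_AMM_TO_IMM_NI_MATERIALI": "IMMOBILIZZAZIONI_MATERIALI",
--     # Codici gerarchici (legacy)
--     "A1.1": "DISPONIBILITA_LIQUIDE",
--     "A1.2": "CREDITI_COMMERCIALI",
--     "A1.3": "RIMANENZE",
--     "A1.4": "ATTIVITA_FINANZIARIE",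
--     "A1.5": "CREDITI_TRIBUTARI",
--     "A1.6": "CREDITI_VS_ALTRI",
--     "A1.7": "RATEI_RISCONTI_ATTIVI",
--     "A2.1": "IMMOBILIZZAZIONI_IMMATERIALI",
--     "A2.2": "IMMOBILIZZAZIONI_MATERIALI",
--     "A2.3": "IMMOBILIZZAZIONI_FINANZIARIE",
--     "A2.4": "PARTECIPAZIONI",
--     "A2.5": "AVVIAMENTO",
-- }
--
--
-- _MAX_PREFIX_LEN = max(map(len, _RICLASS_TO_CATEGORY))
--
-- def _normalize_code(riclass_code: str) -> str:
--     """Rimuove il prefisso SP_ se presente."""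
--     if riclass_code.startswith("SP_"):
--         return riclass_code[3:]
--     return riclass_code
--
-- def _map_riclass_to_category(riclass_code: str) -> str:
--     """Longest-prefix lookup: try the code's own prefixes, longest first."""
--     code = _normalize_code(riclass_code)
--     for n in range(min(len(code), _MAX_PREFIX_LEN), 0, -1):
--         cat = _RICLASS_TO_CATEGORY.get(code[:n])
--         if cat is not None:
--             return cat
--     return "ALTRO_ATTIVO"
-- ===== Notes on version B (the rewrite author's own statement) =====
-- stated objective: simpler
-- what changed: Instead of a direct dict lookup plus a scan over the dict's keys sorted by descending length, B walks the input's own prefixes from longest to shortest and returns the first dict hit, collapsing exact match and longest-prefix match into one loop with no sort.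
import Mathlib
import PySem

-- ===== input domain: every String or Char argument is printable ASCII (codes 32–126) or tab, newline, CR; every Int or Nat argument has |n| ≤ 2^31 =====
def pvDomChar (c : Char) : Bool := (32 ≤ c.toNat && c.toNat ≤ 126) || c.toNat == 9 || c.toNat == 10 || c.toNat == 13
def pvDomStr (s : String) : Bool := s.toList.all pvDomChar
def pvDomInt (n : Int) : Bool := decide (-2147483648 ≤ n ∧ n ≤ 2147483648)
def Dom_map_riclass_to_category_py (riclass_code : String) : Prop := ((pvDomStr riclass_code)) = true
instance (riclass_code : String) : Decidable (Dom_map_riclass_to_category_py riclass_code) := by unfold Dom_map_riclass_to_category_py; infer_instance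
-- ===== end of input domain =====

-- B replaces A's direct lookup + scan of the keys sorted by descending length with one loop over the
-- input's own prefixes, longest first (simpler; no sort). Return-value equivalence, proved for all strings.

-- shared module-level context: the category table and the SP_-stripping helper (identical in both sources)
def pvDict : PySem.Dict String String := PySem.Dict.ofList
  [("LIQUIDITA_E_ESIGIBILITA_IMMEDIATE", "DISPONIBILITA_LIQUIDE"),
   ("CREDITI", "CREDITI_COMMERCIALI"),
   ("RIMANENZE", "RIMANENZE"),
   ("RATEI_E_RISCONTI", "RATEI_RISCONTI_ATTIVI"),
   ("IMMOBILIZZAZIONI_IMMATERIALI", "IMMOBILIZZAZIONI_IMMATERIALI"),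
   ("IMMOBILIZZAZIONI_MATERIALI", "IMMOBILIZZAZIONI_MATERIALI"),
   ("IMMOBILIZZAZIONI_FINANZIARIE", "IMMOBILIZZAZIONI_FINANZIARIE"),
   ("IMMOBILIZZAZIONI_LEASING", "IMMOBILIZZAZIONI_MATERIALI"),
   ("F_DO_AMM_TO_IMM_NI_IMMATERIALI", "IMMOBILIZZAZIONI_IMMATERIALI"),
   ("F_DO_AMM_TO_IMM_NI_MATERIALI", "IMMOBILIZZAZIONI_MATERIALI"),
   ("A1.1", "DISPONIBILITA_LIQUIDE"),
   ("A1.2", "CREDITI_COMMERCIALI"),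
   ("A1.3", "RIMANENZE"),
   ("A1.4", "ATTIVITA_FINANZIARIE"),
   ("A1.5", "CREDITI_TRIBUTARI"),
   ("A1.6", "CREDITI_VS_ALTRI"),
   ("A1.7", "RATEI_RISCONTI_ATTIVI"),
   ("A2.1", "IMMOBILIZZAZIONI_IMMATERIALI"),
   ("A2.2", "IMMOBILIZZAZIONI_MATERIALI"),
   ("A2.3", "IMMOBILIZZAZIONI_FINANZIARIE"),
   ("A2.4", "PARTECIPAZIONI"),
   ("A2.5", "AVVIAMENTO")]

def pvNormalize (riclass_code : String) : String :=
  if PySem.Str.startswith riclass_code "SP_" then PySem.Str.slice riclass_code (some 3) none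
  else riclass_code

-- ===== PORT A =====
-- the 'for prefix, cat in sorted(...): if code.startswith(prefix): return cat' loop, then the fallback
def pvScanA : List (String × String) → String → String
  | [], _ => "ALTRO_ATTIVO"
  | (pre, cat) :: rest, code =>
      if PySem.Str.startswith code pre then cat else pvScanA rest code

def map_riclass_to_category_py (riclass_code : String) : String :=
  let code := pvNormalize riclass_code
  if pvDict.contains code then (pvDict.get? code).getD "ALTRO_ATTIVO"
  else pvScanA (PySem.List.sorted pvDict.items (fun x => -(PySem.Str.len x.1)) false) code

-- ===== PORT B =====
-- _MAX_PREFIX_LEN = max(map(len, _RICLASS_TO_CATEGORY))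
def pvMaxPrefixLen : Int := (PySem.List.max? (pvDict.keys.map PySem.Str.len) (fun x => x)).getD 0

-- 'for n in range(min(len(code), _MAX_PREFIX_LEN), 0, -1): cat = dict.get(code[:n]); if cat is not None: return cat'
def pvScanB (code : String) : Nat → String
  | 0 => "ALTRO_ATTIVO"
  | n + 1 =>
      match pvDict.get? (PySem.Str.slice code none (some ((n + 1 : Nat) : Int))) with
      | some cat => cat
      | none => pvScanB code n

def map_riclass_to_category_py_alt (riclass_code : String) : String :=
  let code := pvNormalize riclass_code
  pvScanB code (min (PySem.Str.len code) pvMaxPrefixLen).toNat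

-- ===== PRECONDITION & SPEC =====
def Spec_map_riclass_to_category_py (riclass_code : String) (out : String) : Prop := out = map_riclass_to_category_py_alt riclass_code
instance (riclass_code : String) (out : String) : Decidable (Spec_map_riclass_to_category_py riclass_code out) := by unfold Spec_map_riclass_to_category_py; infer_instance

-- ===== CLAIM (what is proved, stated in full; the proofs are below) =====
def Claim_equal_map_riclass_to_category_py : Prop := ∀ (riclass_code : String), Dom_map_riclass_to_category_py riclass_code → Spec_map_riclass_to_category_py riclass_code (map_riclass_to_category_py riclass_code)

-- ===== LEMMAS AND PROOFS =====

-- no key of the table is a prefix of a different key (hence at most one key is a prefix of any given code)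
theorem pv_no_key_prefix : ∀ p ∈ pvDict.items, ∀ q ∈ pvDict.items, p.1.toList <+: q.1.toList → p = q := by
  decide

theorem pv_uniq_pfx {code : String} {p q : String × String}
    (hp : p ∈ pvDict.items) (hq : q ∈ pvDict.items)
    (hpc : p.1.toList <+: code.toList) (hqc : q.1.toList <+: code.toList) : p = q := by
  rcases List.prefix_or_prefix_of_prefix hpc hqc with h | h
  · exact pv_no_key_prefix p hp q hq h
  · exact (pv_no_key_prefix q hq p hp h).symm

-- get? in terms of items membership
theorem pv_get?_some {k : String} {v : String} (h : pvDict.get? k = some v) :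
    ∃ q ∈ pvDict.items, q.1 = k ∧ q.2 = v := by
  unfold PySem.Dict.get? at h
  rcases Option.map_eq_some_iff.mp h with ⟨q, hq, hqv⟩
  exact ⟨q, List.mem_of_find?_eq_some hq, by simpa using List.find?_some hq, hqv⟩

theorem pv_get?_of_mem {p : String × String} (hp : p ∈ pvDict.items)
    (huniq : ∀ q ∈ pvDict.items, q.1 = p.1 → q = p) :
    pvDict.get? p.1 = some p.2 := by
  unfold PySem.Dict.get?
  cases hfind : pvDict.items.find? (fun q => q.1 == p.1) with
  | none => exact absurd (by simp) (List.find?_eq_none.mp hfind p hp)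
  | some q =>
    have hq1 : q.1 = p.1 := by simpa using List.find?_some hfind
    have := huniq q (List.mem_of_find?_eq_some hfind) hq1
    simp [this]

-- code[:n] as a list of chars
theorem pv_slice_take (code : String) (n : Nat) :
    (PySem.Str.slice code none (some ((n : Nat) : Int))).toList = code.toList.take n := by
  simp [PySem.Str.slice, PySem.Chars.slice, PySem.List.slice_to_natCast]

theorem pv_key_ne_nil : ∀ p ∈ pvDict.items, p.1.toList ≠ [] := by decide

theorem pv_key_le : ∀ p ∈ pvDict.items, p.1.toList.length ≤ 33 := by decide

-- B's loop finds the unique prefix key, if there is one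
theorem pv_scanB_hit (code : String) (p : String × String) (hp : p ∈ pvDict.items)
    (hpfx : p.1.toList <+: code.toList) :
    ∀ n, p.1.toList.length ≤ n → n ≤ code.toList.length → pvScanB code n = p.2 := by
  intro n
  induction n with
  | zero =>
    intro h1 _
    exact absurd (List.length_eq_zero_iff.mp (Nat.le_zero.mp h1)) (pv_key_ne_nil p hp)
  | succ n ih =>
    intro h1 h2
    have hslice := pv_slice_take code (n + 1)
    by_cases hlen : p.1.toList.length = n + 1
    · have hs : PySem.Str.slice code none (some ((n + 1 : Nat) : Int)) = p.1 := by
        apply String.toList_inj.mp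
        rw [hslice, ← hlen, ← List.prefix_iff_eq_take.mp hpfx]
      have hget : pvDict.get? (PySem.Str.slice code none (some ((n + 1 : Nat) : Int))) = some p.2 := by
        rw [hs]
        exact pv_get?_of_mem hp (fun q hq hq1 => pv_uniq_pfx hq hp (hq1 ▸ hpfx) hpfx)
      simp only [pvScanB, hget]
    · have hlt : p.1.toList.length ≤ n := by omega
      have hget : pvDict.get? (PySem.Str.slice code none (some ((n + 1 : Nat) : Int))) = none := by
        cases hg : pvDict.get? (PySem.Str.slice code none (some ((n + 1 : Nat) : Int))) with
        | none => rfl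
        | some v =>
          rcases pv_get?_some hg with ⟨q, hq, hq1, _⟩
          have hql : q.1.toList = code.toList.take (n + 1) := by rw [hq1, hslice]
          have hqpfx : q.1.toList <+: code.toList := hql ▸ List.take_prefix _ _
          have := pv_uniq_pfx hq hp hqpfx hpfx
          have : p.1.toList.length = n + 1 := by
            rw [← this, hql, List.length_take]; omega
          omega
      simp only [pvScanB, hget]
      exact ih hlt (by omega)

theorem pv_scanB_miss (code : String)
    (hnone : ∀ q ∈ pvDict.items, ¬ q.1.toList <+: code.toList) :
    ∀ n, pvScanB code n = "ALTRO_ATTIVO" := by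
  intro n
  induction n with
  | zero => rfl
  | succ n ih =>
    have hget : pvDict.get? (PySem.Str.slice code none (some ((n + 1 : Nat) : Int))) = none := by
      cases hg : pvDict.get? (PySem.Str.slice code none (some ((n + 1 : Nat) : Int))) with
      | none => rfl
      | some v =>
        rcases pv_get?_some hg with ⟨q, hq, hq1, _⟩
        have hql : q.1.toList = code.toList.take (n + 1) := by rw [hq1, pv_slice_take]
        exact absurd (hql ▸ List.take_prefix _ _) (hnone q hq)
    simp only [pvScanB, hget]
    exact ih

-- startswith unfolded to list prefix
theorem pv_startswith_iff (code pre : String) :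
    PySem.Str.startswith code pre = true ↔ pre.toList <+: code.toList := by
  rw [PySem.Str.startswith_eq]
  unfold PySem.Chars.startswith
  exact List.isPrefixOf_iff_prefix

-- A's loop finds the unique prefix key too, on any rearrangement of the items
theorem pv_scanA_hit (code : String) (p : String × String) (hp : p ∈ pvDict.items)
    (hpfx : p.1.toList <+: code.toList) :
    ∀ L : List (String × String), (∀ q ∈ L, q ∈ pvDict.items) → p ∈ L → pvScanA L code = p.2 := by
  intro L
  induction L with
  | nil => intro _ hmem; exact absurd hmem (List.not_mem_nil)
  | cons hd tl ih =>
    intro hsub hmem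
    obtain ⟨a, b⟩ := hd
    by_cases hsw : PySem.Str.startswith code a = true
    · have heq : (a, b) = p :=
        pv_uniq_pfx (hsub _ List.mem_cons_self) hp ((pv_startswith_iff code a).mp hsw) hpfx
      unfold pvScanA
      rw [if_pos hsw]
      exact congrArg Prod.snd heq
    · have hne : p ≠ (a, b) := fun h =>
        hsw ((pv_startswith_iff code a).mpr (by simpa [h] using hpfx))
      unfold pvScanA
      rw [if_neg hsw]
      exact ih (fun q hq => hsub q (List.mem_cons_of_mem _ hq))
        ((List.mem_cons.mp hmem).resolve_left hne)

theorem pv_scanA_miss (code : String)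
    (hnone : ∀ q ∈ pvDict.items, ¬ q.1.toList <+: code.toList) :
    ∀ L : List (String × String), (∀ q ∈ L, q ∈ pvDict.items) → pvScanA L code = "ALTRO_ATTIVO" := by
  intro L
  induction L with
  | nil => intro _; rfl
  | cons hd tl ih =>
    intro hsub
    obtain ⟨a, b⟩ := hd
    have hsw : ¬ PySem.Str.startswith code a = true := fun h =>
      hnone _ (hsub _ List.mem_cons_self) ((pv_startswith_iff code a).mp h)
    unfold pvScanA
    rw [if_neg hsw]
    exact ih (fun q hq => hsub q (List.mem_cons_of_mem _ hq))

-- the two lookup strategies agree on every (already normalized) code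
theorem pv_core (code : String) :
    (if pvDict.contains code then (pvDict.get? code).getD "ALTRO_ATTIVO"
     else pvScanA (PySem.List.sorted pvDict.items (fun x => -(PySem.Str.len x.1)) false) code)
    = pvScanB code (min (PySem.Str.len code) pvMaxPrefixLen).toNat := by
  have hM : pvMaxPrefixLen = 33 := by decide
  have hlen : (min (PySem.Str.len code) pvMaxPrefixLen).toNat = min code.toList.length 33 := by
    rw [hM, PySem.Str.len_eq]; omega
  by_cases hP : ∃ p ∈ pvDict.items, p.1.toList <+: code.toList
  · rcases hP with ⟨p, hp, hpfx⟩
    have hB : pvScanB code (min (PySem.Str.len code) pvMaxPrefixLen).toNat = p.2 := by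
      rw [hlen]
      exact pv_scanB_hit code p hp hpfx _
        (le_min (List.IsPrefix.length_le hpfx) (pv_key_le p hp)) (min_le_left _ _)
    rw [hB]
    by_cases hc : pvDict.contains code = true
    · rw [if_pos hc]
      unfold PySem.Dict.contains at hc
      rcases List.any_eq_true.mp hc with ⟨q, hq, hq1⟩
      have hq1 : q.1 = code := by simpa using hq1
      have hqp : q = p := pv_uniq_pfx hq hp (hq1 ▸ List.prefix_refl _) hpfx
      have : code = p.1 := by rw [← hq1, hqp]
      rw [this, pv_get?_of_mem hp (fun r hr hr1 => pv_uniq_pfx hr hp (hr1 ▸ hpfx) hpfx)]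
      rfl
    · rw [if_neg hc]
      exact pv_scanA_hit code p hp hpfx _
        (fun q hq => (PySem.List.mem_sorted _ _ _ _).mp hq)
        ((PySem.List.mem_sorted _ _ _ _).mpr hp)
  · push Not at hP
    have hB : pvScanB code (min (PySem.Str.len code) pvMaxPrefixLen).toNat = "ALTRO_ATTIVO" :=
      pv_scanB_miss code hP _
    have hc : ¬ pvDict.contains code = true := by
      intro hc
      unfold PySem.Dict.contains at hc
      rcases List.any_eq_true.mp hc with ⟨q, hq, hq1⟩
      have hq1 : q.1 = code := by simpa using hq1
      exact hP q hq (hq1 ▸ List.prefix_refl _)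
    rw [hB, if_neg hc]
    exact pv_scanA_miss code hP _ (fun q hq => (PySem.List.mem_sorted _ _ _ _).mp hq)

-- ===== VERDICT (by name: the statement is the Claim_ definition above) =====
theorem map_riclass_to_category_py_spec : Claim_equal_map_riclass_to_category_py := by
  intro rc _
  unfold Spec_map_riclass_to_category_py map_riclass_to_category_py map_riclass_to_category_py_alt
  exact pv_core (pvNormalize rc)
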